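/- GENERATED by tools/from_farm_form.py from prooffarm-gif/accepted/DGifDecompressLine.10/Lemmas.lean (a worked proof of the farm's unit `DGifDecompressLine.10`,
   accepted by the verdict) — do not edit. -/
import Gif.Spec.Units.DGifDecompressLine_10
import Gif.Spec.LzwCarry

/-!
  Lemmas for the unit `DGifDecompressLine.10` (segment 10 of the LZW decoder: ONE ROUND of the trace loop, l.955-960).

  Everything general is in the tree: the 32-bit forms in Gif/Spec/Words.lean (§5c: `sext32_small`, `part32_toInt_small`, `toInt_nonneg`,
  `sext32_bv`, `lea32_succ`, `setcc_and_ne_zero`), the carry of `Body` and `Locals` through the segment's stores and `Trace` at another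
  address in Gif/Spec/LzwCarry.lean (`Body.carry`, `dl_scratch`, `Trace.moved`, `Body.gif_inside`, `Body.pv_inside`). What is left is
  the arithmetic of THIS segment's loop test:

      dl10_test_true          the test of l.955-957 was true: `StackPtr ≤ 4094`, and `CrntPrefix` sign-extends to a number `c`,
                              `1 ≤ c ≤ 4095` (an index of `Suffix[4096]` and `Prefix[4096]`)
-/

open X86 X86.User Asan ProgX.Base ProgX.Base.Spec Gif.Spec

namespace Gif.Spec.DGifDecompressLine_10

/-- **The loop test of the trace loop was true** (`cmp ebx, 4094 ; setle dl ; cmp r12d, r15d ; setg al ; test dl, al ; je` not taken: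
`h1` is the walker's branch fact `hbr_106e5c`; `cmp r12d, 4095 ; jg` not taken: `h2` is `hbr_106e65`; both as they stand). `bx` =
StackPtr and `r15` = ClearCode hold non-negative `int`s; `r12` = CrntPrefix is ANY 32-bit value. Then `StackPtr ≤ 4094`, and
`movsxd r64, r12d` is a number `c` with `ClearCode < c ≤ 4095`, so `1 ≤ c`: the `Word` equation rewrites the walker's facts
`w_rdi`, `w_r12`, `w_rbp`. -/
theorem dl10_test_true (bx r15 r12 : Word) (hbx : bx.toNat < 2 ^ 31) (h15 : r15.toNat < 2 ^ 31)
    (h1 : ¬ ((if (Word.part .w32 bx).toInt ≤ (4094#32).toInt then (1 : BitVec 8) else 0) &&&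
        (if (Word.part .w32 r15).toInt < (Word.part .w32 r12).toInt then 1 else 0)).toNat = 0)
    (h2 : (Word.part .w32 r12).toInt ≤ (4095#32).toInt) :
    bx.toNat ≤ 4094 ∧
    ∃ c, 1 ≤ c ∧ c ≤ 4095 ∧ Word.ofBV (BitVec.signExtend 64 (Word.part .w32 r12)) = UInt64.ofNat c := by
  -- both conditions of the `&&` hold
  obtain ⟨hb1, hb2⟩ := (setcc_and_ne_zero _ _).mp h1
  -- … as numbers
  have e4094 : (4094#32).toInt = 4094 := by decide
  have e4095 : (4095#32).toInt = 4095 := by decide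
  rw [part32_toInt_small bx hbx, e4094] at hb1
  rw [part32_toInt_small r15 h15] at hb2
  rw [e4095] at h2
  -- `CrntPrefix` is above `ClearCode ≥ 0`: its signed value is its number
  have hnn : 0 ≤ (Word.part .w32 r12).toInt := by omega
  obtain ⟨hc1, hc2⟩ := toInt_nonneg _ hnn
  have hsx := sext32_bv _ hc2
  rw [hc1] at hb2 h2
  refine ⟨by omega, (Word.part .w32 r12).toNat, by omega, by omega, hsx⟩

end Gif.Spec.DGifDecompressLine_10
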